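-- pv_equiv track=rewrite | github.com/davidfbpereira/pws_repo | filtering/scripts/pre_processor.py | password_counter
-- ===== SOURCE A (Python) =====
-- def password_counter(pre_processed_dataset):
-- 	stats = {'Unique passwords' : 0, 'Duplicated passwords' : 0, 'Dataset size' : 0}
--
-- 	for password, count in pre_processed_dataset.items():
-- 		stats['Dataset size'] += count
--
-- 		if count == 1:
-- 			stats['Unique passwords'] += 1
-- 		else:
-- 			stats['Duplicated passwords'] +=1
--
-- 	return stats
-- ===== SOURCE B (Python) =====
-- def _stats(vals):
--     # divide and conquer: stats of a slice = merge of the stats of its halves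
--     n = len(vals)
--     if n == 0:
--         return (0, 0, 0)
--     if n == 1:
--         c = vals[0]
--         return (1, 0, c) if c == 1 else (0, 1, c)
--     mid = n // 2
--     u1, d1, s1 = _stats(vals[:mid])
--     u2, d2, s2 = _stats(vals[mid:])
--     return (u1 + u2, d1 + d2, s1 + s2)
--
-- def password_counter(pre_processed_dataset):
--     u, d, s = _stats(list(pre_processed_dataset.values()))
--     return {'Unique passwords': u, 'Duplicated passwords': d, 'Dataset size': s}
-- ===== Notes on version B (the rewrite author's own statement) =====
-- stated objective: alternative
-- what changed: Replaces A's single fused loop mutating a stats dict with a divide-and-conquer recursion that computes a (unique, duplicated, size) triple for each half of the value list and merges the triples, building the result dict once at the end.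
import Mathlib
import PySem

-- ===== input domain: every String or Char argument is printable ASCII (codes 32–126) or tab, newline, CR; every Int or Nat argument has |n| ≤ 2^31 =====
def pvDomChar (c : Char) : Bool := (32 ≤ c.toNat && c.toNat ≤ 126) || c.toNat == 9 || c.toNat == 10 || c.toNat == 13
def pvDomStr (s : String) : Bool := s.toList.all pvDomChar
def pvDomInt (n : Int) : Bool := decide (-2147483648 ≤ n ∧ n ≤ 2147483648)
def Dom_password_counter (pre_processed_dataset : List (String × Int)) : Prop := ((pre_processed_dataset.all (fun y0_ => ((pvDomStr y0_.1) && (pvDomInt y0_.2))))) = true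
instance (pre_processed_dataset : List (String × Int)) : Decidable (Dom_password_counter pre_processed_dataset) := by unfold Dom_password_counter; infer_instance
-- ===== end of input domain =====

-- B replaces A's single fused stats-dict loop with a divide-and-conquer recursion merging (unique, duplicated, size) triples of the two halves (alternative decomposition, same O(n)).

-- ===== PORT A =====
-- A: stats dict initialised with the three keys, one loop over items mutating the three counters.
def password_counter (pre_processed_dataset : List (String × Int)) : List (String × Int) :=
  let stats : PySem.Dict String Int :=
    ((PySem.Dict.empty.insert "Unique passwords" 0).insert "Duplicated passwords" 0).insert "Dataset size" 0
  let stats := pre_processed_dataset.foldl (fun stats pc =>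
    let stats := stats.modify "Dataset size" 0 (· + pc.2)
    if pc.2 == 1 then
      stats.modify "Unique passwords" 0 (· + 1)
    else
      stats.modify "Duplicated passwords" 0 (· + 1)) stats
  stats.items

-- ===== PORT B =====
-- B helper _stats: divide and conquer over the value list, merging the triples of the two halves.
def pvStats : List Int → Int × Int × Int
  | [] => (0, 0, 0)
  | [c] => if c == 1 then (1, 0, c) else (0, 1, c)
  | a :: b :: t =>
    let mid := (a :: b :: t).length / 2
    let r1 := pvStats ((a :: b :: t).take mid)
    let r2 := pvStats ((a :: b :: t).drop mid)
    (r1.1 + r2.1, r1.2.1 + r2.2.1, r1.2.2 + r2.2.2)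
termination_by l => l.length
decreasing_by
  · simp; omega
  · simp; omega

-- B: run the divide-and-conquer on the values, build the result dict once.
def password_counter_alt (pre_processed_dataset : List (String × Int)) : List (String × Int) :=
  let r := pvStats (pre_processed_dataset.map (·.2))
  [("Unique passwords", r.1), ("Duplicated passwords", r.2.1), ("Dataset size", r.2.2)]

-- ===== PRECONDITION & SPEC =====
def Spec_password_counter (pre_processed_dataset : List (String × Int)) (out : List (String × Int)) : Prop := out = password_counter_alt pre_processed_dataset
instance (pre_processed_dataset : List (String × Int)) (out : List (String × Int)) : Decidable (Spec_password_counter pre_processed_dataset out) := by unfold Spec_password_counter; infer_instance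

-- ===== CLAIM (what is proved, stated in full; the proofs are below) =====
def Claim_equal_password_counter : Prop := ∀ (pre_processed_dataset : List (String × Int)), Dom_password_counter pre_processed_dataset → Spec_password_counter pre_processed_dataset (password_counter pre_processed_dataset)

-- ===== LEMMAS AND PROOFS =====

-- Closed form of B's divide and conquer: the triple is (count of 1s, rest, sum).
theorem pvStats_eq (l : List Int) :
    pvStats l = (((l.countP (fun c => c == 1) : Nat) : Int),
                 (l.length : Int) - ((l.countP (fun c => c == 1) : Nat) : Int),
                 l.sum) := by
  induction l using pvStats.induct with
  | case1 => simp [pvStats]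
  | case2 c h => simp_all [pvStats]
  | case3 c h => simp_all [pvStats]
  | case4 a b t mid ih1 ih2 =>
    rw [pvStats]
    show ((pvStats (List.take mid (a :: b :: t))).1 + (pvStats (List.drop mid (a :: b :: t))).1,
          (pvStats (List.take mid (a :: b :: t))).2.1 + (pvStats (List.drop mid (a :: b :: t))).2.1,
          (pvStats (List.take mid (a :: b :: t))).2.2 + (pvStats (List.drop mid (a :: b :: t))).2.2) = _
    rw [ih1, ih2]
    have hsplit := List.take_append_drop mid (a :: b :: t)
    have hc : List.countP (fun c => c == 1) (a :: b :: t)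
        = List.countP (fun c => c == 1) (List.take mid (a :: b :: t))
        + List.countP (fun c => c == 1) (List.drop mid (a :: b :: t)) := by
      conv_lhs => rw [← hsplit]
      rw [List.countP_append]
    have hs : (a :: b :: t).sum
        = (List.take mid (a :: b :: t)).sum
        + (List.drop mid (a :: b :: t)).sum := by
      conv_lhs => rw [← hsplit]
      rw [List.sum_append]
    have hl : (a :: b :: t).length
        = (List.take mid (a :: b :: t)).length
        + (List.drop mid (a :: b :: t)).length := by
      conv_lhs => rw [← hsplit]
      rw [List.length_append]
    refine Prod.ext ?_ (Prod.ext ?_ ?_)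
    · rw [hc]; push_cast; ring
    · rw [hc, hl]; push_cast; ring
    · rw [hs]

-- The invariant of A's loop.
theorem password_counter_loop (l : List (String × Int)) (u d s : Int) :
    (l.foldl (fun stats pc =>
        let stats := stats.modify "Dataset size" 0 (· + pc.2)
        if pc.2 == 1 then
          stats.modify "Unique passwords" 0 (· + 1)
        else
          stats.modify "Duplicated passwords" 0 (· + 1))
      (PySem.Dict.mk [("Unique passwords", u), ("Duplicated passwords", d), ("Dataset size", s)])).items
    = [("Unique passwords", u + ((l.map (·.2)).countP (fun c => c == 1) : Nat)),
       ("Duplicated passwords", d + ((l.length : Int) - ((l.map (·.2)).countP (fun c => c == 1) : Nat))),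
       ("Dataset size", s + (l.map (·.2)).sum)] := by
  induction l generalizing u d s with
  | nil => simp
  | cons p t ih =>
    rw [List.foldl_cons]
    by_cases h : p.2 = 1
    · have hb : (p.2 == 1) = true := by simp [h]
      simp only [hb, if_true]
      have step : (((PySem.Dict.mk [("Unique passwords", u), ("Duplicated passwords", d), ("Dataset size", s)]).modify "Dataset size" 0 (· + p.2)).modify "Unique passwords" 0 (· + 1))
        = PySem.Dict.mk [("Unique passwords", u + 1), ("Duplicated passwords", d), ("Dataset size", s + p.2)] := rfl
      rw [step, ih]
      simp only [List.map_cons, List.countP_cons, List.sum_cons, List.length_cons, hb,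
        if_true, List.cons.injEq, Prod.mk.injEq]
      and_intros <;> first | trivial | (push_cast; ring)
    · have hb : (p.2 == 1) = false := by simp [h]
      simp only [hb, Bool.false_eq_true, if_false]
      have step : (((PySem.Dict.mk [("Unique passwords", u), ("Duplicated passwords", d), ("Dataset size", s)]).modify "Dataset size" 0 (· + p.2)).modify "Duplicated passwords" 0 (· + 1))
        = PySem.Dict.mk [("Unique passwords", u), ("Duplicated passwords", d + 1), ("Dataset size", s + p.2)] := rfl
      rw [step, ih]
      simp only [List.map_cons, List.countP_cons, List.sum_cons, List.length_cons, hb,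
        Bool.false_eq_true, if_false, List.cons.injEq, Prod.mk.injEq]
      and_intros <;> first | trivial | (push_cast; ring)

-- ===== VERDICT (by name: the statement is the Claim_ definition above) =====
theorem password_counter_spec : Claim_equal_password_counter := by
  intro l _
  show password_counter l = password_counter_alt l
  have hinit : ((PySem.Dict.empty.insert "Unique passwords" 0).insert "Duplicated passwords" 0).insert "Dataset size" (0 : Int)
      = PySem.Dict.mk [("Unique passwords", 0), ("Duplicated passwords", 0), ("Dataset size", 0)] := rfl
  simp only [password_counter, password_counter_alt, hinit, password_counter_loop, pvStats_eq]
  simp [List.length_map]
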